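-- pv_equiv track=rewrite | github.com/guanton/causality_path_signatures | data_generation.py | generate_all_variable_indices
-- ===== SOURCE A (Python) =====
-- def generate_all_variable_indices(m: int, q: int) -> dict:
--     """
--     Generates a mapping from variable names to their indices in the tensors.
--
--     Returns:
--     dict: A dictionary where keys are variable names and values are indices arranged.
--     from 0 to M - 1 = m+1 + ... + (m+1)^q
--     """
--     variable_indices = {'Y_0': 0, 't': 1}  # Zero-order term and time variable
--     idx = 2  # Starting index for primary variables
--
--     # Level 1 variables (primary variables)
--     for i in range(1, m + 1):  # Primary variables indexed from 1 to m
--         variable_indices[f'Y_{i}'] = idx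
--         idx += 1
--
--     # Higher-level variables
--     for level in range(2, q + 1):
--         level_size = (m + 1) ** level
--         for i in range(level_size):
--             indices = []
--             temp_i = i
--             for _ in range(level):
--                 indices.append(temp_i % (m + 1))
--                 temp_i = temp_i // (m + 1)
--             indices = indices[::-1]  # Reverse to get correct order
--             var_name = 'Y_' + '_'.join(str(idx_j) for idx_j in indices)
--             variable_indices[var_name] = idx
--             idx += 1
--
--     return variable_indices
-- ===== SOURCE B (Python) =====
-- def generate_all_variable_indices(m: int, q: int) -> dict:
--     variable_indices = {'Y_0': 0, 't': 1}
--     idx = 2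
--
--     for i in range(1, m + 1):
--         variable_indices[f'Y_{i}'] = idx
--         idx += 1
--
--     # Build each level's name suffixes by extending the previous level's
--     # table, instead of decomposing integer counters into digits.
--     prev = [str(d) for d in range(m + 1)]
--     for level in range(2, q + 1):
--         cur = [p + '_' + str(d) for p in prev for d in range(m + 1)]
--         for name in cur:
--             variable_indices['Y_' + name] = idx
--             idx += 1
--         prev = cur
--
--     return variable_indices
-- ===== Notes on version B (the rewrite author's own statement) =====
-- stated objective: alternative
-- what changed: A enumerates each level by decomposing an integer counter into base-(m+1) digits (inner digit loop plus a reverse and a power computation per name); B builds each level's name suffixes by extending the previous level's suffix table, so digits, reversal and powers disappear.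
-- intended difference: For m <= -2 and q >= 2, A returns extra higher-level entries whose names carry the negative pseudo-digits of Python's floor division (e.g. 'Y_-1_-1', 'Y_0_0' for m=-2); B returns only the preamble entries {'Y_0':0,'t':1}, the intended mapping for a nonpositive variable count. — e.g. on generate_all_variable_indices(-2, 2): A returns [("Y_0", 0), ("t", 1), ("Y_0_0", 2)], B returns [("Y_0", 0), ("t", 1)]
import Mathlib
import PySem

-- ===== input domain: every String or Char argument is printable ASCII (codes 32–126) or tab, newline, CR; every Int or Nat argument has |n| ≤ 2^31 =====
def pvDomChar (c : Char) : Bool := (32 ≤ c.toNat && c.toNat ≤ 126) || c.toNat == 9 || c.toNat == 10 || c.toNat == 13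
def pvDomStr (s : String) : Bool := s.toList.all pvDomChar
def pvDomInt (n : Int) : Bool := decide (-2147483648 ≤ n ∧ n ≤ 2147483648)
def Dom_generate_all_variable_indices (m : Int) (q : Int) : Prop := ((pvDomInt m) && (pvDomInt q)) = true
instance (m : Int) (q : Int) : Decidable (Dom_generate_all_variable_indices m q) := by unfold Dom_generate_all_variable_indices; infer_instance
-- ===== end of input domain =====

-- B replaces A's per-counter integer digit decomposition by extending the previous level's
-- suffix table (objective: alternative decomposition, similar cost); B returns the intended
-- preamble-only mapping when m < 0 (see D_ below) instead of A's negative-digit names.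

-- ===== PORT A =====
def generate_all_variable_indices (m : Int) (q : Int) : List (String × Int) :=
  -- variable_indices = {'Y_0': 0, 't': 1}; idx = 2
  let st0 : PySem.Dict String Int × Int := (PySem.Dict.ofList [("Y_0", 0), ("t", 1)], 2)
  -- for i in range(1, m + 1): variable_indices[f'Y_{i}'] = idx; idx += 1
  let st1 := (PySem.List.pyRange 1 (m + 1)).foldl
    (fun (s : PySem.Dict String Int × Int) i =>
      (s.1.insert ("Y_" ++ PySem.Int.toStr i) s.2, s.2 + 1)) st0
  -- for level in range(2, q + 1): ...
  let st2 := (PySem.List.pyRange 2 (q + 1)).foldl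
    (fun (s : PySem.Dict String Int × Int) level =>
      -- level_size = (m + 1) ** level  (here 2 ≤ level, so the Int exponent is its toNat)
      let level_size : Int := (m + 1) ^ level.toNat
      -- for i in range(level_size): ...
      (PySem.List.pyRange 0 level_size).foldl
        (fun (t : PySem.Dict String Int × Int) i =>
          -- indices = []; temp_i = i; for _ in range(level): indices.append(temp_i % (m+1)); temp_i = temp_i // (m+1)
          let u := (PySem.List.pyRange 0 level).foldl
            (fun (u : List Int × Int) _ =>
              (u.1 ++ [PySem.Int.mod u.2 (m + 1)], PySem.Int.floordiv u.2 (m + 1))) ([], i)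
          -- indices = indices[::-1]   (step -1 ≠ 0, so slice? is always some)
          let indices := (PySem.List.slice? u.1 none none (-1)).getD []
          -- var_name = 'Y_' + '_'.join(str(idx_j) for idx_j in indices)
          let var_name := "Y_" ++ PySem.Str.join "_" (indices.map (fun j => PySem.Int.toStr j))
          (t.1.insert var_name t.2, t.2 + 1)) s) st1
  st2.1.items

-- ===== PORT B =====
def generate_all_variable_indices_alt (m : Int) (q : Int) : List (String × Int) :=
  let st0 : PySem.Dict String Int × Int := (PySem.Dict.ofList [("Y_0", 0), ("t", 1)], 2)
  -- for i in range(1, m + 1): variable_indices[f'Y_{i}'] = idx; idx += 1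
  let st1 := (PySem.List.pyRange 1 (m + 1)).foldl
    (fun (s : PySem.Dict String Int × Int) i =>
      (s.1.insert ("Y_" ++ PySem.Int.toStr i) s.2, s.2 + 1)) st0
  -- prev = [str(d) for d in range(m + 1)]
  let prev0 := (PySem.List.pyRange 0 (m + 1)).map PySem.Int.toStr
  -- for level in range(2, q + 1): cur = [...]; for name in cur: ...; prev = cur
  let st2 := (PySem.List.pyRange 2 (q + 1)).foldl
    (fun (s : (PySem.Dict String Int × Int) × List String) _level =>
      let cur := s.2.flatMap
        (fun p => (PySem.List.pyRange 0 (m + 1)).map (fun d => p ++ "_" ++ PySem.Int.toStr d))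
      let t := cur.foldl
        (fun (t : PySem.Dict String Int × Int) name =>
          (t.1.insert ("Y_" ++ name) t.2, t.2 + 1)) s.1
      (t, cur)) (st1, prev0)
  st2.1.1.items

-- ===== PRECONDITION & SPEC =====
-- For m ≤ -2 and q ≥ 2, A returns extra higher-level entries whose names carry the negative
-- pseudo-digits of Python's floor division (e.g. 'Y_-1_-1'); B returns only the preamble and
-- level-1 entries there, the intended mapping for a nonpositive variable count.
def D_generate_all_variable_indices (m : Int) (q : Int) : Prop := m ≤ -2 ∧ 2 ≤ q
instance (m : Int) (q : Int) : Decidable (D_generate_all_variable_indices m q) := by unfold D_generate_all_variable_indices; infer_instance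
def Spec_generate_all_variable_indices (m : Int) (q : Int) (out : List (String × Int)) : Prop := ¬ D_generate_all_variable_indices m q → out = generate_all_variable_indices_alt m q
instance (m : Int) (q : Int) (out : List (String × Int)) : Decidable (Spec_generate_all_variable_indices m q out) := by unfold Spec_generate_all_variable_indices; infer_instance
def pvDiffWitness_generate_all_variable_indices : Int × Int := (-2, 2)
def pvDiffWitnessOut_generate_all_variable_indices : (List (String × Int)) × (List (String × Int)) :=
  ([("Y_0", 0), ("t", 1), ("Y_0_0", 2)], [("Y_0", 0), ("t", 1)])

-- ===== CLAIM (what is proved, stated in full; the proofs are below) =====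
def Claim_unchanged_generate_all_variable_indices : Prop := ∀ (m : Int) (q : Int), Dom_generate_all_variable_indices m q → Spec_generate_all_variable_indices m q (generate_all_variable_indices m q)
def Claim_changed_generate_all_variable_indices : Prop := Dom_generate_all_variable_indices (pvDiffWitness_generate_all_variable_indices.1) (pvDiffWitness_generate_all_variable_indices.2) ∧ D_generate_all_variable_indices (pvDiffWitness_generate_all_variable_indices.1) (pvDiffWitness_generate_all_variable_indices.2) ∧ generate_all_variable_indices (pvDiffWitness_generate_all_variable_indices.1) (pvDiffWitness_generate_all_variable_indices.2) = pvDiffWitnessOut_generate_all_variable_indices.1 ∧ generate_all_variable_indices_alt (pvDiffWitness_generate_all_variable_indices.1) (pvDiffWitness_generate_all_variable_indices.2) = pvDiffWitnessOut_generate_all_variable_indices.2 ∧ pvDiffWitnessOut_generate_all_variable_indices.1 ≠ pvDiffWitnessOut_generate_all_variable_indices.2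
def Claim_exact_generate_all_variable_indices : Prop := ∀ (m : Int) (q : Int), Dom_generate_all_variable_indices m q → D_generate_all_variable_indices m q → generate_all_variable_indices m q ≠ generate_all_variable_indices_alt m q

-- ===== LEMMAS AND PROOFS =====

-- Proof-side views of the two ports' loop bodies and shared preamble state.
def pvInit (m : Int) : PySem.Dict String Int × Int :=
  (PySem.List.pyRange 1 (m + 1)).foldl
    (fun (s : PySem.Dict String Int × Int) i =>
      (s.1.insert ("Y_" ++ PySem.Int.toStr i) s.2, s.2 + 1))
    (PySem.Dict.ofList [("Y_0", 0), ("t", 1)], 2)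

def pvAbody (m : Int) (s : PySem.Dict String Int × Int) (level : Int) :
    PySem.Dict String Int × Int :=
  let level_size : Int := (m + 1) ^ level.toNat
  (PySem.List.pyRange 0 level_size).foldl
    (fun (t : PySem.Dict String Int × Int) i =>
      let u := (PySem.List.pyRange 0 level).foldl
        (fun (u : List Int × Int) _ =>
          (u.1 ++ [PySem.Int.mod u.2 (m + 1)], PySem.Int.floordiv u.2 (m + 1))) ([], i)
      let indices := (PySem.List.slice? u.1 none none (-1)).getD []
      let var_name := "Y_" ++ PySem.Str.join "_" (indices.map (fun j => PySem.Int.toStr j))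
      (t.1.insert var_name t.2, t.2 + 1)) s

def pvBbody (m : Int) (s : (PySem.Dict String Int × Int) × List String) (_level : Int) :
    (PySem.Dict String Int × Int) × List String :=
  let cur := s.2.flatMap
    (fun p => (PySem.List.pyRange 0 (m + 1)).map (fun d => p ++ "_" ++ PySem.Int.toStr d))
  let t := cur.foldl
    (fun (t : PySem.Dict String Int × Int) name =>
      (t.1.insert ("Y_" ++ name) t.2, t.2 + 1)) s.1
  (t, cur)

theorem pvA_eq (m q : Int) : generate_all_variable_indices m q
    = ((PySem.List.pyRange 2 (q + 1)).foldl (pvAbody m) (pvInit m)).1.items := rfl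

theorem pvB_eq (m q : Int) : generate_all_variable_indices_alt m q
    = ((PySem.List.pyRange 2 (q + 1)).foldl (pvBbody m)
        (pvInit m, (PySem.List.pyRange 0 (m + 1)).map PySem.Int.toStr)).1.1.items := rfl

-- Digit decomposition (big-endian is the reverse) and iterated floor division, as A builds them.
def pvDigits (m : Int) : Nat → Int → List Int
  | 0, _ => []
  | L + 1, i => PySem.Int.mod i (m + 1) :: pvDigits m L (PySem.Int.floordiv i (m + 1))

def pvIter (m : Int) : Nat → Int → Int
  | 0, t => t
  | L + 1, t => pvIter m L (PySem.Int.floordiv t (m + 1))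

def pvSuffix (m : Int) (L : Nat) (i : Int) : String :=
  PySem.Str.join "_" ((pvDigits m L i).reverse.map (fun j => PySem.Int.toStr j))

-- B's per-level suffix table.
def pvPrev (m : Int) : Nat → List String
  | 0 => [""]
  | 1 => (PySem.List.pyRange 0 (m + 1)).map PySem.Int.toStr
  | L + 2 => (pvPrev m (L + 1)).flatMap
      (fun p => (PySem.List.pyRange 0 (m + 1)).map (fun d => p ++ "_" ++ PySem.Int.toStr d))

theorem pvDigits_length (m : Int) (L : Nat) (i : Int) : (pvDigits m L i).length = L := by
  induction L generalizing i with
  | zero => rfl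
  | succ L ih => simp [pvDigits, ih]

theorem pvDigits_loop (m : Int) (l : List Int) (acc : List Int) (t : Int) :
    l.foldl (fun (u : List Int × Int) _ =>
        (u.1 ++ [PySem.Int.mod u.2 (m + 1)], PySem.Int.floordiv u.2 (m + 1))) (acc, t)
      = (acc ++ pvDigits m l.length t, pvIter m l.length t) := by
  induction l generalizing acc t with
  | nil => simp [pvDigits, pvIter]
  | cons a l ih => simp [List.foldl_cons, ih, pvDigits, pvIter]

theorem pvAbody_emit (m level : Int) (s : PySem.Dict String Int × Int) :
    pvAbody m s level = (PySem.List.pyRange 0 ((m + 1) ^ level.toNat)).foldl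
      (fun t i => (t.1.insert ("Y_" ++ pvSuffix m level.toNat i) t.2, t.2 + 1)) s := by
  unfold pvAbody
  apply PySem.List.foldl_congr_mem
  intro acc x _
  rw [pvDigits_loop]
  simp [PySem.List.slice?_none_none_neg_one, pvSuffix, PySem.List.length_pyRange_one]

theorem pvStrJoin_singleton (sep s : String) : PySem.Str.join sep [s] = s := by
  apply String.toList_inj.mp
  simp [PySem.Str.toList_join, PySem.Chars.join_singleton]

theorem pvCharsJoin_append_singleton (sep : List Char) (xs : List (List Char)) (y : List Char)
    (h : xs ≠ []) :
    PySem.Chars.join sep (xs ++ [y]) = PySem.Chars.join sep xs ++ sep ++ y := by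
  induction xs with
  | nil => simp at h
  | cons a l ih =>
    cases l with
    | nil => simp [PySem.Chars.join_cons_cons, PySem.Chars.join_singleton]
    | cons b l' =>
      simp only [List.cons_append, PySem.Chars.join_cons_cons]
      rw [show b :: (l' ++ [y]) = (b :: l') ++ [y] from rfl, ih (by simp)]
      simp [List.append_assoc]

theorem pvStrJoin_append_singleton (xs : List String) (y : String) (h : xs ≠ []) :
    PySem.Str.join "_" (xs ++ [y]) = PySem.Str.join "_" xs ++ "_" ++ y := by
  apply String.toList_inj.mp
  simp only [String.toList_append, PySem.Str.toList_join, List.map_append, List.map_cons,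
    List.map_nil]
  rw [pvCharsJoin_append_singleton _ _ _ (by simpa using h)]

theorem pvRange_mul (a n : Nat) : List.range (a * n)
    = (List.range a).flatMap (fun j => (List.range n).map (fun d => j * n + d)) := by
  induction a with
  | zero => simp
  | succ a ih =>
    rw [Nat.succ_mul, List.range_add, ih, List.range_succ, List.flatMap_append]
    simp [List.flatMap]

theorem pvSuffix_one (mn : Nat) (i : Int) (h0 : 0 ≤ i) (h1 : i < (mn : Int) + 1) :
    pvSuffix (mn : Int) 1 i = PySem.Int.toStr i := by
  unfold pvSuffix pvDigits pvDigits
  rw [PySem.Int.mod_eq_emod_of_pos (by omega : (0:Int) < (mn:Int) + 1), Int.emod_eq_of_lt h0 (by omega)]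
  simp [pvStrJoin_singleton]

theorem pvSuffix_succ (mn : Nat) (L : Nat) (hL : 1 ≤ L) (j d : Nat) (hd : d < mn + 1) :
    pvSuffix (mn : Int) (L + 1) ((j * (mn + 1) + d : Nat) : Int)
      = pvSuffix (mn : Int) L (j : Int) ++ "_" ++ PySem.Int.toStr (d : Int) := by
  have hb : ((mn : Int) + 1) = ((mn + 1 : Nat) : Int) := by push_cast; ring
  have hmod : PySem.Int.mod ((j * (mn + 1) + d : Nat) : Int) ((mn : Int) + 1) = (d : Int) := by
    rw [hb, PySem.Int.mod_natCast]
    congr 1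
    rw [Nat.mul_comm j (mn + 1), Nat.mul_add_mod, Nat.mod_eq_of_lt hd]
  have hdiv : PySem.Int.floordiv ((j * (mn + 1) + d : Nat) : Int) ((mn : Int) + 1) = (j : Int) := by
    rw [hb, PySem.Int.floordiv_natCast]
    congr 1
    rw [Nat.mul_comm j (mn + 1), Nat.mul_add_div (by omega), Nat.div_eq_of_lt hd]
    omega
  show PySem.Str.join "_" ((pvDigits _ (L + 1) _).reverse.map _) = _
  rw [show pvDigits (mn : Int) (L + 1) ((j * (mn + 1) + d : Nat) : Int)
      = PySem.Int.mod ((j * (mn + 1) + d : Nat) : Int) ((mn : Int) + 1)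
        :: pvDigits (mn : Int) L (PySem.Int.floordiv ((j * (mn + 1) + d : Nat) : Int) ((mn : Int) + 1)) from rfl,
    hmod, hdiv]
  rw [List.reverse_cons, List.map_append]
  simp only [List.map_cons, List.map_nil]
  rw [pvStrJoin_append_singleton _ _ (by
    simp only [ne_eq, List.map_eq_nil_iff, List.reverse_eq_nil_iff]
    intro hnil
    have := pvDigits_length (mn : Int) L (j : Int)
    rw [hnil] at this
    simp at this
    omega)]
  rfl

theorem pvKey (mn : Nat) : ∀ L : Nat, 1 ≤ L →
    (PySem.List.pyRange 0 (((mn : Int) + 1) ^ L)).map (pvSuffix (mn : Int) L)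
      = pvPrev (mn : Int) L := by
  intro L
  induction L with
  | zero => omega
  | succ L ih =>
    intro _
    cases L with
    | zero =>
      rw [show ((mn : Int) + 1) ^ 1 = (mn : Int) + 1 from pow_one _]
      show _ = (PySem.List.pyRange 0 ((mn : Int) + 1)).map PySem.Int.toStr
      apply List.map_congr_left
      intro i hi
      rw [PySem.List.mem_pyRange_one] at hi
      exact pvSuffix_one mn i hi.1 (by simpa using hi.2)
    | succ L' =>
      have hL' : 1 ≤ L' + 1 := by omega
      have hcast : ∀ k : Nat, ((mn : Int) + 1) ^ k = (((mn + 1) ^ k : Nat) : Int) := by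
        intro k; push_cast; ring
      rw [hcast, PySem.List.pyRange_zero_nat,
        show (mn + 1) ^ (L' + 1 + 1) = (mn + 1) ^ (L' + 1) * (mn + 1) from pow_succ _ _,
        pvRange_mul, List.map_map, List.map_flatMap]
      show _ = (pvPrev (mn : Int) (L' + 1)).flatMap
        (fun p => (PySem.List.pyRange 0 ((mn : Int) + 1)).map
          (fun d => p ++ "_" ++ PySem.Int.toStr d))
      rw [← ih hL', hcast, PySem.List.pyRange_zero_nat, List.map_map, List.flatMap_map]
      apply List.flatMap_congr
      intro j hj
      rw [show ((mn : Int) + 1) = ((mn + 1 : Nat) : Int) from by push_cast; ring,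
        PySem.List.pyRange_zero_nat, List.map_map, List.map_map]
      apply List.map_congr_left
      intro d hd
      simp only [Function.comp_apply]
      exact pvSuffix_succ mn (L' + 1) hL' j d (by simpa using hd)

theorem pvEmit_congr {α β : Type} (l₁ : List α) (l₂ : List β) (f : α → String) (g : β → String)
    (h : l₁.map f = l₂.map g) (s : PySem.Dict String Int × Int) :
    l₁.foldl (fun t x => (t.1.insert (f x) t.2, t.2 + 1)) s
      = l₂.foldl (fun t y => (t.1.insert (g y) t.2, t.2 + 1)) s := by
  calc l₁.foldl (fun t x => (t.1.insert (f x) t.2, t.2 + 1)) s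
      = (l₁.map f).foldl (fun (t : PySem.Dict String Int × Int) n => (t.1.insert n t.2, t.2 + 1)) s :=
        (List.foldl_map (f := f) (g := fun (t : PySem.Dict String Int × Int) n => (t.1.insert n t.2, t.2 + 1))).symm
    _ = (l₂.map g).foldl (fun t n => (t.1.insert n t.2, t.2 + 1)) s := by rw [h]
    _ = l₂.foldl (fun t y => (t.1.insert (g y) t.2, t.2 + 1)) s := List.foldl_map (f := g) (g := fun (t : PySem.Dict String Int × Int) n => (t.1.insert n t.2, t.2 + 1))

theorem pvStep_eq (mn : Nat) (a : Int) (ha : 2 ≤ a) (s : PySem.Dict String Int × Int) :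
    pvBbody (mn : Int) (s, pvPrev (mn : Int) (a - 1).toNat) a
      = (pvAbody (mn : Int) s a, pvPrev (mn : Int) a.toNat) := by
  obtain ⟨L, hL⟩ : ∃ L : Nat, (a - 1).toNat = L + 1 := ⟨(a - 2).toNat, by omega⟩
  have haN : a.toNat = L + 2 := by omega
  have hcur : (pvPrev (mn : Int) (a - 1).toNat).flatMap
      (fun p => (PySem.List.pyRange 0 ((mn : Int) + 1)).map
        (fun d => p ++ "_" ++ PySem.Int.toStr d)) = pvPrev (mn : Int) a.toNat := by
    rw [hL, haN]; rfl
  simp only [pvBbody, hcur]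
  refine Prod.ext ?_ rfl
  show _ = pvAbody (mn : Int) s a
  rw [pvAbody_emit]
  refine (pvEmit_congr (pvPrev (mn : Int) a.toNat)
    (PySem.List.pyRange 0 (((mn : Int) + 1) ^ a.toNat))
    (fun name => "Y_" ++ name) (fun i => "Y_" ++ pvSuffix (mn : Int) a.toNat i) ?_ s)
  rw [← pvKey mn a.toNat (by omega), List.map_map]
  rfl

theorem pvOuter (mn : Nat) : ∀ (k : Nat) (a : Int), 2 ≤ a →
    ∀ s : PySem.Dict String Int × Int,
    (PySem.List.pyRange a (a + (k : Int))).foldl (pvAbody (mn : Int)) s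
      = ((PySem.List.pyRange a (a + (k : Int))).foldl (pvBbody (mn : Int))
          (s, pvPrev (mn : Int) (a - 1).toNat)).1 := by
  intro k
  induction k with
  | zero =>
    intro a _ s
    rw [PySem.List.pyRange_one_eq_nil (by omega)]
    rfl
  | succ k ih =>
    intro a ha s
    rw [PySem.List.pyRange_one_cons (by omega : a < a + ((k + 1 : Nat) : Int))]
    simp only [List.foldl_cons]
    rw [pvStep_eq mn a ha s]
    have harg : a + ((k + 1 : Nat) : Int) = (a + 1) + (k : Int) := by push_cast; ring
    have hprev : pvPrev (mn : Int) a.toNat = pvPrev (mn : Int) ((a + 1) - 1).toNat := by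
      congr 1; omega
    rw [harg, hprev]
    exact ih (a + 1) (by omega) _

theorem pvBnil (m : Int) : ∀ (l : List Int) (x : PySem.Dict String Int × Int),
    l.foldl (pvBbody m) (x, ([] : List String)) = (x, []) := by
  intro l
  induction l with
  | nil => intro x; rfl
  | cons a l ih =>
    intro x
    simp only [List.foldl_cons]
    rw [show pvBbody m (x, ([] : List String)) a = (x, []) from by simp [pvBbody]]
    exact ih x

theorem pvMod0 (b : Int) : PySem.Int.mod 0 b = 0 := by
  simp [PySem.Int.mod]

theorem pvDiv0 (b : Int) : PySem.Int.floordiv 0 b = 0 := by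
  simp [PySem.Int.floordiv]

theorem pvMonoInner {α : Type} (nm : α → String) (l : List α) :
    ∀ (s : PySem.Dict String Int × Int) (k : String), s.1.contains k = true →
    ((l.foldl (fun t x => (t.1.insert (nm x) t.2, t.2 + 1)) s).1).contains k = true := by
  induction l with
  | nil => intro s k h; exact h
  | cons a l ih =>
    intro s k h
    simp only [List.foldl_cons]
    apply ih
    show ((s.1.insert (nm a) s.2).contains k) = true
    rw [PySem.Dict.contains_insert]
    simp [h]

theorem pvMonoOuter (m : Int) (l : List Int) :
    ∀ (s : PySem.Dict String Int × Int) (k : String), s.1.contains k = true →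
    ((l.foldl (pvAbody m) s).1).contains k = true := by
  induction l with
  | nil => intro s k h; exact h
  | cons a l ih =>
    intro s k h
    simp only [List.foldl_cons]
    apply ih
    rw [pvAbody_emit]
    exact pvMonoInner _ _ _ _ h

-- ===== VERDICT (by name: the statement is the Claim_ definition above) =====
theorem generate_all_variable_indices_spec : Claim_unchanged_generate_all_variable_indices := by
  intro m q _
  unfold Spec_generate_all_variable_indices
  intro hnd
  rw [pvA_eq, pvB_eq]
  by_cases hq : q ≤ 1
  · rw [PySem.List.pyRange_one_eq_nil (by omega : q + 1 ≤ 2)]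
    rfl
  · have hq2 : 2 ≤ q := by omega
    have hm : -1 ≤ m := by
      by_contra h
      exact hnd ⟨by omega, hq2⟩
    by_cases hm1 : m = -1
    · subst hm1
      have hA : ∀ (s : PySem.Dict String Int × Int), ∀ level ∈ PySem.List.pyRange 2 (q + 1),
          pvAbody (-1) s level = s := by
        intro s level hlev
        rw [PySem.List.mem_pyRange_one] at hlev
        simp only [pvAbody]
        rw [show ((-1 : Int) + 1) = 0 from by ring,
          zero_pow (by omega : level.toNat ≠ 0),
          PySem.List.pyRange_one_eq_nil (le_refl 0)]
        rfl
      rw [PySem.List.foldl_congr_mem _ _ (fun s _ => s) _ hA, List.foldl_fixed,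
        show (PySem.List.pyRange 0 ((-1 : Int) + 1)).map PySem.Int.toStr = ([] : List String) from by
          rw [PySem.List.pyRange_one_eq_nil (by omega)]; rfl,
        pvBnil]
    · have hm0 : 0 ≤ m := by omega
      obtain ⟨mn, rfl⟩ : ∃ mn : Nat, m = (mn : Int) := ⟨m.toNat, by omega⟩
      rw [show q + 1 = 2 + (((q - 1).toNat : Nat) : Int) from by omega,
        pvOuter mn (q - 1).toNat 2 (by omega) (pvInit mn)]
      rfl

theorem generate_all_variable_indices_changed : Claim_changed_generate_all_variable_indices := by
  unfold Claim_changed_generate_all_variable_indices; decide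

theorem generate_all_variable_indices_tight : Claim_exact_generate_all_variable_indices := by
  unfold Claim_exact_generate_all_variable_indices
  intro m q _ hd heq
  obtain ⟨hm, hq⟩ := hd
  rw [pvA_eq, pvB_eq] at heq
  have hinit : pvInit m = (PySem.Dict.ofList [("Y_0", 0), ("t", 1)], 2) := by
    unfold pvInit
    rw [PySem.List.pyRange_one_eq_nil (by omega)]
    rfl
  rw [show (PySem.List.pyRange 0 (m + 1)).map PySem.Int.toStr = ([] : List String) from by
      rw [PySem.List.pyRange_one_eq_nil (by omega)]; rfl,
    pvBnil] at heq
  -- A's dict contains the first level-2 name 'Y_0_0'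
  have hdig : pvDigits m 2 0 = [0, 0] := by
    simp [pvDigits, pvMod0, pvDiv0]
  have hname : ("Y_" ++ pvSuffix m (2 : Int).toNat 0) = "Y_0_0" := by
    unfold pvSuffix
    rw [show ((2 : Int).toNat) = 2 from rfl, hdig]
    decide
  have hc : (((PySem.List.pyRange 2 (q + 1)).foldl (pvAbody m) (pvInit m)).1).contains "Y_0_0"
      = true := by
    rw [PySem.List.pyRange_one_cons (by omega : (2 : Int) < q + 1)]
    simp only [List.foldl_cons]
    apply pvMonoOuter
    rw [pvAbody_emit]
    have hpos : (0 : Int) < (m + 1) ^ ((2 : Int).toNat) := by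
      rw [show ((2 : Int).toNat) = 2 from rfl, pow_two]
      exact mul_pos_of_neg_of_neg (by omega) (by omega)
    rw [PySem.List.pyRange_one_cons hpos]
    simp only [List.foldl_cons]
    apply pvMonoInner
    show ((pvInit m).1.insert ("Y_" ++ pvSuffix m (2 : Int).toNat 0) (pvInit m).2).contains
      "Y_0_0" = true
    rw [hname]
    exact PySem.Dict.contains_insert_self _ _ _
  have hmem := (PySem.Dict.contains_iff_mem_keys _ _).mp hc
  simp only [PySem.Dict.keys] at hmem
  rw [heq, hinit] at hmem
  exact absurd hmem (by decide)
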